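-- pv_equiv track=rewrite | github.com/monika0603/lovely-python | strings/overlapping_characters.py | overlapping_char
-- ===== SOURCE A (Python) =====
-- def overlapping_char(s1, s2):
--
--     count_s1 = {}
--     count_s2 = {}
--
--     for char in s1:
--         count_s1[char] = 1 + count_s1.get(char, 0)
--
--     for char in s2:
--         count_s2[char] = 1 + count_s2.get(char, 0)
--
--     overlap = [key for key in count_s1 if key in count_s2]
--
--     result = 0
--     for char in overlap:
--         if count_s1[char] < count_s2[char]:
--             result += count_s1[char]
--         else:
--             result += count_s2[char]
--
--     return result
-- ===== SOURCE B (Python) =====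
-- def overlapping_char(s1, s2):
--     supply = {}
--     for c in s1:
--         supply[c] = supply.get(c, 0) + 1
--     result = 0
--     for c in s2:
--         if supply.get(c, 0) > 0:
--             result += 1
--             supply[c] = supply[c] - 1
--     return result
-- ===== Notes on version B (the rewrite author's own statement) =====
-- stated objective: alternative
-- what changed: Instead of building two frequency dicts, intersecting their key sets and summing minima, B builds one supply dict from s1 and makes a single destructive pass over s2, counting each character that still has supply left and decrementing it.
import Mathlib
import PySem

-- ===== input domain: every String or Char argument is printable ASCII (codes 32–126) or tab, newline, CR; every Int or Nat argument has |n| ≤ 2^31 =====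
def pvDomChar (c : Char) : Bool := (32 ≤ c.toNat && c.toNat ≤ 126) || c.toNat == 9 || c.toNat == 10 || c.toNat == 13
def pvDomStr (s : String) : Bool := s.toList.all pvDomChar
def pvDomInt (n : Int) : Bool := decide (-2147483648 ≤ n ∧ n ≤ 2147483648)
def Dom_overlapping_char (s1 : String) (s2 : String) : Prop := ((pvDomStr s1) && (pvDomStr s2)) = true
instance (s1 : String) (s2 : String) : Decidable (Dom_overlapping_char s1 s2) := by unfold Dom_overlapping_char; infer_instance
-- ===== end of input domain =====

-- B replaces A's two frequency dicts + key-intersection + min-summation by one supply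
-- dict from s1 and a single destructive counting pass over s2 (alternative decomposition).

-- ===== PORT A =====
def overlapping_char (s1 : String) (s2 : String) : Int :=
  let count_s1 := s1.toList.foldl (fun d c => d.insert c (1 + d.getD c 0)) (PySem.Dict.empty : PySem.Dict Char Int)
  let count_s2 := s2.toList.foldl (fun d c => d.insert c (1 + d.getD c 0)) (PySem.Dict.empty : PySem.Dict Char Int)
  let overlap := count_s1.keys.filter (fun k => count_s2.contains k)
  -- count_s1[char] / count_s2[char]: keys of `overlap` are always present, so getD _ 0 is exact
  overlap.foldl (fun result c =>
    if count_s1.getD c 0 < count_s2.getD c 0 then result + count_s1.getD c 0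
    else result + count_s2.getD c 0) 0

-- ===== PORT B =====
def overlapping_char_alt (s1 : String) (s2 : String) : Int :=
  let supply := s1.toList.foldl (fun d c => d.insert c (d.getD c 0 + 1)) (PySem.Dict.empty : PySem.Dict Char Int)
  -- supply[c] exists whenever supply.get(c,0) > 0, so getD _ 0 is exact
  (s2.toList.foldl (fun s c =>
    if 0 < s.1.getD c 0 then (s.1.insert c (s.1.getD c 0 - 1), s.2 + 1) else s)
    (supply, (0 : Int))).2

-- ===== PRECONDITION & SPEC =====
def Spec_overlapping_char (s1 : String) (s2 : String) (out : Int) : Prop := out = overlapping_char_alt s1 s2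
instance (s1 : String) (s2 : String) (out : Int) : Decidable (Spec_overlapping_char s1 s2 out) := by unfold Spec_overlapping_char; infer_instance

-- ===== CLAIM (what is proved, stated in full; the proofs are below) =====
def Claim_equal_overlapping_char : Prop := ∀ (s1 : String) (s2 : String), Dom_overlapping_char s1 s2 → Spec_overlapping_char s1 s2 (overlapping_char s1 s2)

-- ===== LEMMAS AND PROOFS =====

-- A's counter loop writes `1 + get(c,0)`; same function as the PySem counter shape.
lemma counter_fun_eq :
    (fun (d : PySem.Dict Char Int) c => d.insert c (1 + d.getD c 0))
      = (fun (d : PySem.Dict Char Int) c => d.insert c (d.getD c 0 + 1)) := by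
  funext d c; rw [Int.add_comm]

-- The common target: Σ_{c ∈ chars of s2} min(count in s1, count in s2).
def targetSum (s1 s2 : String) : Int :=
  ∑ c ∈ s2.toList.toFinset, min (s1.toList.count c : Int) (s2.toList.count c : Int)

-- 'if a < b then r + a else r + b' accumulates min a b.
lemma foldl_min (L : List Char) (f g : Char → Int) (acc : Int) :
    L.foldl (fun r c => if f c < g c then r + f c else r + g c) acc
      = acc + (L.map (fun c => min (f c) (g c))).sum := by
  have hfun : (fun (r : Int) c => if f c < g c then r + f c else r + g c)
      = fun r c => r + min (f c) (g c) := by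
    funext r c
    split_ifs with h <;> omega
  rw [hfun, PySem.List.foldl_add]

lemma A_eq_target (s1 s2 : String) : overlapping_char s1 s2 = targetSum s1 s2 := by
  unfold overlapping_char
  rw [counter_fun_eq, PySem.Dict.foldl_insert_getD_add_one_eq_counter,
      PySem.Dict.foldl_insert_getD_add_one_eq_counter, foldl_min, Int.zero_add]
  simp only [PySem.Dict.getD_counter, PySem.Dict.keys_counter]
  set L := (PySem.Set.ofList s1.toList).filter
      (fun k => (PySem.Dict.counter s2.toList).contains k) with hL
  have hnodup : L.Nodup := (PySem.Set.nodup_ofList _).filter _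
  have hmem : ∀ c : Char, c ∈ L ↔ c ∈ s1.toList ∧ c ∈ s2.toList := by
    intro c
    rw [hL, List.mem_filter, PySem.Set.mem_ofList, PySem.Dict.contains_counter]
    simp
  rw [← List.sum_toFinset _ hnodup]
  unfold targetSum
  apply Finset.sum_subset
  · intro c hc
    rw [List.mem_toFinset] at *
    exact ((hmem c).mp hc).2
  · intro c hc2 hcL
    rw [List.mem_toFinset] at hc2 hcL
    have h1 : c ∉ s1.toList := fun h1 => hcL ((hmem c).mpr ⟨h1, hc2⟩)
    rw [List.count_eq_zero_of_not_mem h1]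
    have : (0 : Int) ≤ (s2.toList.count c : Int) := by positivity
    push_cast
    omega

lemma bloop (U : Finset Char) (l : List Char) :
    ∀ (d : PySem.Dict Char Int) (r : Int),
      (∀ c, 0 ≤ d.getD c 0) → (∀ x ∈ l, x ∈ U) →
      (l.foldl (fun s c =>
          if 0 < s.1.getD c 0 then (s.1.insert c (s.1.getD c 0 - 1), s.2 + 1) else s)
        (d, r)).2
        = r + ∑ c ∈ U, min (d.getD c 0) (l.count c : Int) := by
  induction l with
  | nil =>
      intro d r hd _
      simp only [List.foldl_nil, List.count_nil]
      have : ∑ c ∈ U, min (d.getD c 0) ((0 : Nat) : Int) = 0 := by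
        apply Finset.sum_eq_zero
        intro c _
        have := hd c; omega
      rw [this]; ring
  | cons c t ih =>
      intro d r hd hU
      by_cases h : 0 < d.getD c 0
      · simp only [List.foldl_cons, if_pos h]
        rw [ih (d.insert c (d.getD c 0 - 1)) (r + 1)
              (by intro k; rw [PySem.Dict.getD_insert]
                  split_ifs with hk
                  · subst hk; omega
                  · exact hd k)
              (fun x hx => hU x (List.mem_cons_of_mem _ hx))]
        have hsum : ∑ k ∈ U, min (d.getD k 0) ((c :: t).count k : Int)
            = (∑ k ∈ U, min ((d.insert c (d.getD c 0 - 1)).getD k 0) (t.count k : Int))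
              + (∑ k ∈ U, if k = c then (1 : Int) else 0) := by
          rw [← Finset.sum_add_distrib]
          apply Finset.sum_congr rfl
          intro k _
          rw [PySem.Dict.getD_insert, List.count_cons]
          by_cases hk : k = c
          · simp only [hk, beq_self_eq_true, if_true]
            push_cast; omega
          · simp [hk, Ne.symm hk]
        rw [hsum, Finset.sum_ite_eq' U c (fun _ => (1 : Int)),
            if_pos (hU c (List.mem_cons_self ..))]
        ring
      · simp only [List.foldl_cons, if_neg h]
        rw [ih d r hd (fun x hx => hU x (List.mem_cons_of_mem _ hx))]
        congr 1
        apply Finset.sum_congr rfl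
        intro k _
        rw [List.count_cons]
        by_cases hk : k = c
        · have := hd c
          simp only [hk, beq_self_eq_true, if_true]
          push_cast; omega
        · simp [Ne.symm hk]

lemma B_eq_target (s1 s2 : String) : overlapping_char_alt s1 s2 = targetSum s1 s2 := by
  unfold overlapping_char_alt targetSum
  rw [bloop s2.toList.toFinset s2.toList _ 0
        (by intro c
            rw [PySem.Dict.getD_foldl_insert_add_one, PySem.Dict.getD_empty]
            positivity)
        (fun x hx => List.mem_toFinset.mpr hx)]
  rw [Int.zero_add]
  apply Finset.sum_congr rfl
  intro k _
  rw [PySem.Dict.getD_foldl_insert_add_one, PySem.Dict.getD_empty, Int.zero_add]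

-- ===== VERDICT (by name: the statement is the Claim_ definition above) =====
theorem overlapping_char_spec : Claim_equal_overlapping_char := by
  intro s1 s2 _
  unfold Spec_overlapping_char
  rw [A_eq_target, B_eq_target]
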